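-- pv_equiv track=rewrite | github.com/vkinnnnn/MLOps | src/extraction/schedule_extractor.py | identify_schedule_columns
-- ===== SOURCE A (Python) =====
-- from typing import Optional, Dict, Any, List
--
-- def identify_schedule_columns(headers: List[str]) -> Dict[str, int]:
--     """
--     Identify relevant columns in payment schedule table.
--
--     Args:
--         headers: List of table headers
--
--     Returns:
--         Dictionary mapping column types to indices
--     """
--     headers_lower = [h.lower() for h in headers]
--     column_map = {}
--
--     # Identify payment number/installment column
--     for i, header in enumerate(headers_lower):
--         if any(term in header for term in ['installment', 'payment no', 'emi no', 'no.', 'sr.', 'serial']):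
--             column_map['payment_number'] = i
--             break
--
--     # Identify date column
--     for i, header in enumerate(headers_lower):
--         if any(term in header for term in ['date', 'due date', 'payment date', 'emi date']):
--             column_map['date'] = i
--             break
--
--     # Identify total amount column
--     for i, header in enumerate(headers_lower):
--         if any(term in header for term in ['total', 'emi amount', 'payment amount', 'installment amount']):
--             if 'principal' not in header and 'interest' not in header:
--                 column_map['total_amount'] = i
--                 break
--
--     # Identify principal component column
--     for i, header in enumerate(headers_lower):
--         if 'principal' in header:
--             column_map['principal'] = i
--             break
--
--     # Identify interest component column
--     for i, header in enumerate(headers_lower):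
--         if 'interest' in header:
--             column_map['interest'] = i
--             break
--
--     # Identify outstanding balance column
--     for i, header in enumerate(headers_lower):
--         if any(term in header for term in ['outstanding', 'balance', 'remaining']):
--             column_map['outstanding'] = i
--             break
--
--     return column_map
-- ===== SOURCE B (Python) =====
-- # B: single pass over headers with a category table, instead of six separate scans.
-- _CATS = [
--     ('payment_number', ['installment', 'payment no', 'emi no', 'no.', 'sr.', 'serial'], ()),
--     ('date', ['date', 'due date', 'payment date', 'emi date'], ()),
--     ('total_amount', ['total', 'emi amount', 'payment amount', 'installment amount'],
--      ('principal', 'interest')),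
--     ('principal', ['principal'], ()),
--     ('interest', ['interest'], ()),
--     ('outstanding', ['outstanding', 'balance', 'remaining'], ()),
-- ]
--
-- def identify_schedule_columns(headers):
--     found = {}
--     for i, h in enumerate(headers):
--         hl = h.lower()
--         for key, terms, excl in _CATS:
--             if key not in found and any(t in hl for t in terms) \
--                     and not any(x in hl for x in excl):
--                 found[key] = i
--     return {key: found[key] for key, _, _ in _CATS if key in found}
-- ===== Notes on version B (the rewrite author's own statement) =====
-- stated objective: alternative
-- what changed: Six separate scans of the header list (one per column category) are replaced by one pass over the headers driven by a category table, recording each category's first matching index, then emitting the map in the fixed category order.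
import Mathlib
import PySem

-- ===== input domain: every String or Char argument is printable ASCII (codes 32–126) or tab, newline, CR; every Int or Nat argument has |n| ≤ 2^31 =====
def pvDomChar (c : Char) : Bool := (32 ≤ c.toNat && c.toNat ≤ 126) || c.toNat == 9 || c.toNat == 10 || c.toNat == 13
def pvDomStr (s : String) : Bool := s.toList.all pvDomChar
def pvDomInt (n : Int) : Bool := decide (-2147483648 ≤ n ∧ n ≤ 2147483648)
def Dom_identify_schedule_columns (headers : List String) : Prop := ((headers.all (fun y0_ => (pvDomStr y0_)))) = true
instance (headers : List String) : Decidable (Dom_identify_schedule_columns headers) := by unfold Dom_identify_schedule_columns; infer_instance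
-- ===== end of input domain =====

-- B replaces A's six separate header scans by one table-driven pass; same result, alternative decomposition.

-- ===== PORT A =====
-- each 'for i, header in enumerate(...): if <cond>: assign; break' loop of A,
-- as a first-match search over the enumerated list
def pvFindFirst (p : String → Bool) : List (Int × String) → Option Int
  | [] => none
  | (i, h) :: rest => if p h then some i else pvFindFirst p rest

def pvPay (h : String) : Bool :=
  PySem.Str.isIn "installment" h || PySem.Str.isIn "payment no" h || PySem.Str.isIn "emi no" h ||
  PySem.Str.isIn "no." h || PySem.Str.isIn "sr." h || PySem.Str.isIn "serial" h

def pvDate (h : String) : Bool :=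
  PySem.Str.isIn "date" h || PySem.Str.isIn "due date" h || PySem.Str.isIn "payment date" h ||
  PySem.Str.isIn "emi date" h

def pvTotal (h : String) : Bool :=
  (PySem.Str.isIn "total" h || PySem.Str.isIn "emi amount" h || PySem.Str.isIn "payment amount" h ||
   PySem.Str.isIn "installment amount" h) &&
  (!PySem.Str.isIn "principal" h && !PySem.Str.isIn "interest" h)

def pvPrin (h : String) : Bool := PySem.Str.isIn "principal" h
def pvIntr (h : String) : Bool := PySem.Str.isIn "interest" h

def pvOut (h : String) : Bool :=
  PySem.Str.isIn "outstanding" h || PySem.Str.isIn "balance" h || PySem.Str.isIn "remaining" h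

def pvInsOpt (d : PySem.Dict String Int) (k : String) (o : Option Int) : PySem.Dict String Int :=
  match o with
  | some i => d.insert k i
  | none => d

def identify_schedule_columns (headers : List String) : List (String × Int) :=
  let hl := headers.map PySem.Str.lower
  let e := PySem.List.enumerate hl
  let m : PySem.Dict String Int := PySem.Dict.empty
  let m := pvInsOpt m "payment_number" (pvFindFirst pvPay e)
  let m := pvInsOpt m "date" (pvFindFirst pvDate e)
  let m := pvInsOpt m "total_amount" (pvFindFirst pvTotal e)
  let m := pvInsOpt m "principal" (pvFindFirst pvPrin e)
  let m := pvInsOpt m "interest" (pvFindFirst pvIntr e)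
  let m := pvInsOpt m "outstanding" (pvFindFirst pvOut e)
  m.items

-- ===== PORT B =====
-- state of the single pass: first matching index found so far for each of the six categories
def pvUpd (p : String → Bool) (o : Option Int) (i : Int) (hl : String) : Option Int :=
  if o.isNone && p hl then some i else o

def pvState := Option Int × Option Int × Option Int × Option Int × Option Int × Option Int

def pvStep (s : pvState) (ih : Int × String) : pvState :=
  let hl := PySem.Str.lower ih.2
  (pvUpd pvPay s.1 ih.1 hl, pvUpd pvDate s.2.1 ih.1 hl, pvUpd pvTotal s.2.2.1 ih.1 hl,
   pvUpd pvPrin s.2.2.2.1 ih.1 hl, pvUpd pvIntr s.2.2.2.2.1 ih.1 hl, pvUpd pvOut s.2.2.2.2.2 ih.1 hl)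

def pvEmit (k : String) (o : Option Int) : List (String × Int) :=
  match o with
  | some i => [(k, i)]
  | none => []

def identify_schedule_columns_alt (headers : List String) : List (String × Int) :=
  let s := (PySem.List.enumerate headers).foldl pvStep (none, none, none, none, none, none)
  pvEmit "payment_number" s.1 ++ pvEmit "date" s.2.1 ++ pvEmit "total_amount" s.2.2.1 ++
  pvEmit "principal" s.2.2.2.1 ++ pvEmit "interest" s.2.2.2.2.1 ++ pvEmit "outstanding" s.2.2.2.2.2

-- ===== PRECONDITION & SPEC =====
def Spec_identify_schedule_columns (headers : List String) (out : List (String × Int)) : Prop := out = identify_schedule_columns_alt headers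
instance (headers : List String) (out : List (String × Int)) : Decidable (Spec_identify_schedule_columns headers out) := by unfold Spec_identify_schedule_columns; infer_instance

-- ===== CLAIM (what is proved, stated in full; the proofs are below) =====
def Claim_equal_identify_schedule_columns : Prop := ∀ (headers : List String), Dom_identify_schedule_columns headers → Spec_identify_schedule_columns headers (identify_schedule_columns headers)

-- ===== LEMMAS AND PROOFS =====

-- one component of the fold, starting from 'some j', stays 'some j'
theorem pvFold_upd_some (p : String → Bool) (l : List (Int × String)) (j : Int) :
    l.foldl (fun a ih => pvUpd p a ih.1 (PySem.Str.lower ih.2)) (some j) = some j := by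
  induction l with
  | nil => rfl
  | cons x xs ih => simpa [List.foldl, pvUpd] using ih

-- one component of the fold, starting from 'none', is A's first-match search over lowered headers
theorem pvFold_upd_none (p : String → Bool) (l : List (Int × String)) :
    l.foldl (fun a ih => pvUpd p a ih.1 (PySem.Str.lower ih.2)) none =
      pvFindFirst p (l.map (fun ih => (ih.1, PySem.Str.lower ih.2))) := by
  induction l with
  | nil => rfl
  | cons x xs ih =>
    by_cases h : p (PySem.Str.lower x.2)
    · simp only [List.foldl_cons]
      rw [show pvUpd p none x.1 (PySem.Str.lower x.2) = some x.1 by simp [pvUpd, h]]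
      rw [pvFold_upd_some]
      simp [pvFindFirst, h]
    · simpa [List.foldl, pvUpd, pvFindFirst, h] using ih

-- the six-component fold is the tuple of the six one-component folds
theorem pvFold_step (l : List (Int × String)) (s : pvState) :
    l.foldl pvStep s =
      (l.foldl (fun a ih => pvUpd pvPay a ih.1 (PySem.Str.lower ih.2)) s.1,
       l.foldl (fun a ih => pvUpd pvDate a ih.1 (PySem.Str.lower ih.2)) s.2.1,
       l.foldl (fun a ih => pvUpd pvTotal a ih.1 (PySem.Str.lower ih.2)) s.2.2.1,
       l.foldl (fun a ih => pvUpd pvPrin a ih.1 (PySem.Str.lower ih.2)) s.2.2.2.1,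
       l.foldl (fun a ih => pvUpd pvIntr a ih.1 (PySem.Str.lower ih.2)) s.2.2.2.2.1,
       l.foldl (fun a ih => pvUpd pvOut a ih.1 (PySem.Str.lower ih.2)) s.2.2.2.2.2) := by
  induction l generalizing s with
  | nil => rfl
  | cons x xs ih => simp [List.foldl, pvStep, ih]

-- enumerating the lowered headers = lowering the enumerated headers
theorem pvEnum_map_lower (xs : List String) (s : Int) :
    PySem.List.enumerate (xs.map PySem.Str.lower) s =
      (PySem.List.enumerate xs s).map (fun ih => (ih.1, PySem.Str.lower ih.2)) := by
  induction xs generalizing s with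
  | nil => rfl
  | cons x xs ih => simp [PySem.List.enumerate_cons, ih]

-- A's sequence of conditional inserts into an (initially empty) dict of six distinct keys
-- lists exactly the present (key, index) pairs in the fixed category order
theorem pvDict_items (o1 o2 o3 o4 o5 o6 : Option Int) :
    (pvInsOpt (pvInsOpt (pvInsOpt (pvInsOpt (pvInsOpt (pvInsOpt PySem.Dict.empty
        "payment_number" o1) "date" o2) "total_amount" o3) "principal" o4) "interest" o5)
        "outstanding" o6).items =
      pvEmit "payment_number" o1 ++ pvEmit "date" o2 ++ pvEmit "total_amount" o3 ++
      pvEmit "principal" o4 ++ pvEmit "interest" o5 ++ pvEmit "outstanding" o6 := by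
  cases o1 <;> cases o2 <;> cases o3 <;> cases o4 <;> cases o5 <;> cases o6 <;>
    simp [pvInsOpt, pvEmit, PySem.Dict.insert, PySem.Dict.empty]

-- ===== VERDICT (by name: the statement is the Claim_ definition above) =====
theorem identify_schedule_columns_spec : Claim_equal_identify_schedule_columns := by
  intro headers _
  unfold Spec_identify_schedule_columns identify_schedule_columns identify_schedule_columns_alt
  rw [pvFold_step]
  simp only [pvFold_upd_none, ← pvEnum_map_lower]
  exact pvDict_items _ _ _ _ _ _
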